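-- pv_equiv track=rewrite | github.com/PierreValChem/CS-MSc-Project-files | Data_Processing/molecule_processor.py | _try_heuristic_mapping
-- ===== SOURCE A (Python) =====
-- def _try_heuristic_mapping(peak_atoms, struct_atoms):
--     """Use chemical heuristics to map atoms"""
--     mapping = {}
--
--     # Group by element type
--     for element in ['C', 'H', 'N', 'O', 'S', 'P', 'F', 'Cl', 'Br', 'I']:
--         peak_nums = [k for k, v in peak_atoms.items() if v['element'] == element]
--         struct_indices = [i for i, atom in enumerate(struct_atoms) if atom['element'] == element]
--
--         # Sort both by some criteria (e.g., atom number for peaks)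
--         peak_nums.sort()
--
--         # Simple sequential mapping within each element type
--         for i, peak_num in enumerate(peak_nums):
--             if i < len(struct_indices):
--                 mapping[peak_num] = struct_indices[i]
--
--     return mapping if len(mapping) >= len(peak_atoms) * 0.8 else None
-- ===== SOURCE B (Python) =====
-- def _try_heuristic_mapping(peak_atoms, struct_atoms):
--     """Group once by element, then zip sorted peak keys with struct indices."""
--     allowed = ['C', 'H', 'N', 'O', 'S', 'P', 'F', 'Cl', 'Br', 'I']
--
--     peaks_by_elem = {e: [] for e in allowed}
--     for k, v in peak_atoms.items():
--         e = v['element']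
--         if e in peaks_by_elem:
--             peaks_by_elem[e].append(k)
--
--     structs_by_elem = {e: [] for e in allowed}
--     for i, atom in enumerate(struct_atoms):
--         e = atom['element']
--         if e in structs_by_elem:
--             structs_by_elem[e].append(i)
--
--     mapping = {}
--     for e in allowed:
--         for k, idx in zip(sorted(peaks_by_elem[e]), structs_by_elem[e]):
--             mapping[k] = idx
--
--     # len(mapping) >= len(peak_atoms) * 0.8, exactly, in integers
--     return mapping if 5 * len(mapping) >= 4 * len(peak_atoms) else None
-- ===== Notes on version B (the rewrite author's own statement) =====
-- stated objective: simpler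
-- what changed: Instead of A's ten full scans of both inputs (one filter pass per allowed element), B makes one pass over peak_atoms and one pass over struct_atoms that group keys/indices by element into dicts, then zips each element's sorted peak keys with its struct indices; the 0.8 threshold is checked in exact integer arithmetic (5*m >= 4*n), which agrees with A's float comparison for every attainable length.
import Mathlib
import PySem

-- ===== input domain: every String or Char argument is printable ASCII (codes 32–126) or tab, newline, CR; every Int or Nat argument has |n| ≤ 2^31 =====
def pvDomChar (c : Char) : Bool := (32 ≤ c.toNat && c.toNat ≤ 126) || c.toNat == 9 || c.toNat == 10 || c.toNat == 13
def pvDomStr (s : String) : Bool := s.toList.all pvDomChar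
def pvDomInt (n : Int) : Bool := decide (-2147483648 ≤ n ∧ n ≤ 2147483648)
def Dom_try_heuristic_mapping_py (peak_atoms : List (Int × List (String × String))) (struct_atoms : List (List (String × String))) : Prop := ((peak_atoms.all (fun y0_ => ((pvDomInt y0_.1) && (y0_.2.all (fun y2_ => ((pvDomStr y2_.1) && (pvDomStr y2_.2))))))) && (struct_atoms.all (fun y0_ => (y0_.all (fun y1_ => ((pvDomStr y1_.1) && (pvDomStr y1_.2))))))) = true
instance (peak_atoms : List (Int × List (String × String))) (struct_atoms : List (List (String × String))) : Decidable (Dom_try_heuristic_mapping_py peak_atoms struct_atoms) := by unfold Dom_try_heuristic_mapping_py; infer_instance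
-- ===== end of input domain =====

-- B replaces A's ten filter passes (one per allowed element) with one grouping pass over each
-- input followed by per-element zips; same return value, proved equal on Pre_ (objective: simpler).


-- ===== PORT A =====
-- shared helper: the Python expression d['element'].  Under Pre_ every dict has the key, so the
-- getD default "" (never an element symbol) is unreachable; outside Pre_ Python raises KeyError.
def pvElement (d : List (String × String)) : String :=
  PySem.Dict.getD (PySem.Dict.mk d) "element" ""

def pvElemsA : List String := ["C", "H", "N", "O", "S", "P", "F", "Cl", "Br", "I"]

-- literal port of A: for each element, filter both inputs, sort the peak keys, assign sequentially.
def try_heuristic_mapping_py (peak_atoms : List (Int × List (String × String))) (struct_atoms : List (List (String × String))) : Option (List (Int × Int)) :=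
  let mapping : PySem.Dict Int Int :=
    pvElemsA.foldl (fun mapping element =>
      let peak_nums : List Int :=
        (peak_atoms.filter (fun kv => pvElement kv.2 == element)).map Prod.fst
      let struct_indices : List Int :=
        ((PySem.List.enumerate struct_atoms).filter (fun ia => pvElement ia.2 == element)).map Prod.fst
      let peak_nums := PySem.List.sorted peak_nums (fun x => x) false
      (PySem.List.enumerate peak_nums).foldl (fun mapping ip =>
        if ip.1 < (struct_indices.length : Int) then
          mapping.insert ip.2 (PySem.List.pyGetD struct_indices ip.1 0)
        else mapping) mapping) PySem.Dict.empty
  -- 'len(mapping) >= len(peak_atoms) * 0.8': exact, since 0.8*n has fractional part a multiple of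
  -- 1/5 and the double-rounding error of n*0.8 is below 2^-20 for every length n ≤ 2^31.
  if 4 * peak_atoms.length ≤ 5 * mapping.size then some mapping.items else none

-- ===== PORT B =====
def pvAllowedB : List String := ["C", "H", "N", "O", "S", "P", "F", "Cl", "Br", "I"]

-- literal port of B (Source B): group peak keys / struct indices by element in one pass each, then
-- zip each element's sorted peak keys with its struct indices.
def try_heuristic_mapping_py_alt (peak_atoms : List (Int × List (String × String))) (struct_atoms : List (List (String × String))) : Option (List (Int × Int)) :=
  let peaks_by_elem : PySem.Dict String (List Int) :=
    peak_atoms.foldl (fun d kv =>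
        let e := pvElement kv.2
        if d.contains e then d.modify e [] (fun g => g ++ [kv.1]) else d)
      (pvAllowedB.foldl (fun d e => d.insert e ([] : List Int)) PySem.Dict.empty)
  let structs_by_elem : PySem.Dict String (List Int) :=
    (PySem.List.enumerate struct_atoms).foldl (fun d ia =>
        let e := pvElement ia.2
        if d.contains e then d.modify e [] (fun g => g ++ [ia.1]) else d)
      (pvAllowedB.foldl (fun d e => d.insert e ([] : List Int)) PySem.Dict.empty)
  let mapping : PySem.Dict Int Int :=
    pvAllowedB.foldl (fun mapping e =>
      ((PySem.List.sorted (peaks_by_elem.getD e []) (fun x => x) false).zip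
          (structs_by_elem.getD e [])).foldl
        (fun mapping p => mapping.insert p.1 p.2) mapping) PySem.Dict.empty
  if 4 * peak_atoms.length ≤ 5 * mapping.size then some mapping.items else none

-- ===== PRECONDITION & SPEC =====
-- Pre_ excludes (a) inputs where some peak-value dict or struct-atom dict lacks the key 'element'
-- (there Python A raises KeyError, and B raises too) and (b) assoc lists with duplicate keys,
-- which do not represent any Python dict input (dicts have unique keys).
def Pre_try_heuristic_mapping_py (peak_atoms : List (Int × List (String × String))) (struct_atoms : List (List (String × String))) : Prop :=
  (peak_atoms.map Prod.fst).Nodup ∧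
  (∀ kv ∈ peak_atoms, (kv.2.map Prod.fst).Nodup ∧ "element" ∈ kv.2.map Prod.fst) ∧
  (∀ a ∈ struct_atoms, (a.map Prod.fst).Nodup ∧ "element" ∈ a.map Prod.fst)
instance (peak_atoms : List (Int × List (String × String))) (struct_atoms : List (List (String × String))) : Decidable (Pre_try_heuristic_mapping_py peak_atoms struct_atoms) := by unfold Pre_try_heuristic_mapping_py; infer_instance

def pvWitness_try_heuristic_mapping_py : (List (Int × List (String × String))) × (List (List (String × String))) :=
  ([(2, [("element", "C")]), (1, [("element", "H")])],
   [[("element", "H")], [("element", "C")]])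

def Spec_try_heuristic_mapping_py (peak_atoms : List (Int × List (String × String))) (struct_atoms : List (List (String × String))) (out : Option (List (Int × Int))) : Prop := out = try_heuristic_mapping_py_alt peak_atoms struct_atoms
instance (peak_atoms : List (Int × List (String × String))) (struct_atoms : List (List (String × String))) (out : Option (List (Int × Int))) : Decidable (Spec_try_heuristic_mapping_py peak_atoms struct_atoms out) := by unfold Spec_try_heuristic_mapping_py; infer_instance

-- ===== CLAIM (what is proved, stated in full; the proofs are below) =====
def Claim_equal_try_heuristic_mapping_py : Prop := ∀ (peak_atoms : List (Int × List (String × String))) (struct_atoms : List (List (String × String))), Dom_try_heuristic_mapping_py peak_atoms struct_atoms → Pre_try_heuristic_mapping_py peak_atoms struct_atoms → Spec_try_heuristic_mapping_py peak_atoms struct_atoms (try_heuristic_mapping_py peak_atoms struct_atoms)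

-- ===== LEMMAS AND PROOFS =====

-- The grouping pass, read off at one key: folding B's "append kv under its element if the element
-- is a key of d" over l appends exactly the l-entries whose element is e to d's entry at e.
theorem groupFold_get? {α : Type} (f : α → String) (v : α → Int) :
    ∀ (l : List α) (d : PySem.Dict String (List Int)) (e : String),
      (l.foldl (fun d x =>
          if d.contains (f x) then d.modify (f x) [] (fun g => g ++ [v x]) else d) d).get? e
        = (d.get? e).map (fun g => g ++ (l.filter (fun x => f x == e)).map v) := by
  intro l
  induction l with
  | nil => intro d e; cases h : d.get? e <;> simp [h]
  | cons x t ih =>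
    intro d e
    simp only [List.foldl_cons, List.filter_cons]
    rw [ih]
    by_cases hc : d.contains (f x) = true
    · rw [if_pos hc]
      simp only [PySem.Dict.modify]
      by_cases he : f x = e
      · subst he
        have hg : ∃ g, d.get? (f x) = some g := by
          simp only [PySem.Dict.contains, List.any_eq_true] at hc
          obtain ⟨p, hp, hpk⟩ := hc
          have : (d.items.find? (fun p => p.1 == f x)).isSome := by
            rw [List.find?_isSome]; exact ⟨p, hp, hpk⟩
          simp only [PySem.Dict.get?]
          cases hfind : d.items.find? (fun p => p.1 == f x) with
          | none => rw [hfind] at this; simp at this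
          | some q => exact ⟨q.2, rfl⟩
        obtain ⟨g, hg⟩ := hg
        have hgetD : d.getD (f x) [] = g := by simp [PySem.Dict.getD, hg]
        rw [hgetD, PySem.Dict.get?_insert_self, hg]
        simp
      · rw [PySem.Dict.get?_insert_of_ne _ _ (Ne.symm he)]
        have hbe : (f x == e) = false := by simp [he]
        simp [hbe]
    · rw [if_neg hc]
      by_cases he : f x = e
      · subst he
        have hnone : d.get? (f x) = none := by
          simp only [PySem.Dict.get?]
          cases hfind : d.items.find? (fun p => p.1 == f x) with
          | none => simp
          | some q =>
            exfalso
            have hq := List.find?_some hfind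
            have hmem := List.mem_of_find?_eq_some hfind
            apply hc
            simp only [PySem.Dict.contains, List.any_eq_true]
            exact ⟨q, hmem, hq⟩
        simp [hnone]
      · have hbe : (f x == e) = false := by simp [he]
        simp [hbe]

-- A's inner loop "for i, p in enumerate(xs): if i < len(ys): mapping[p] = ys[i]" is the fold of
-- inserts over zip xs (ys.drop s), where s is the enumerate start.
theorem enumFold_zip :
    ∀ (xs ys : List Int) (s : Nat) (m : PySem.Dict Int Int),
      (PySem.List.enumerate xs (s : Int)).foldl (fun m ip =>
          if ip.1 < (ys.length : Int) then m.insert ip.2 (PySem.List.pyGetD ys ip.1 0) else m) m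
        = (xs.zip (ys.drop s)).foldl (fun m p => m.insert p.1 p.2) m := by
  intro xs
  induction xs with
  | nil => intro ys s m; simp [PySem.List.enumerate]
  | cons x t ih =>
    intro ys s m
    simp only [PySem.List.enumerate, List.foldl_cons]
    by_cases hs : s < ys.length
    · have hlt : ((s : Int) < (ys.length : Int)) := by exact_mod_cast hs
      rw [if_pos hlt]
      have hdrop : ys.drop s = ys[s] :: ys.drop (s + 1) := List.drop_eq_getElem_cons hs
      have hget : PySem.List.pyGetD ys (s : Int) 0 = ys[s] := by
        rw [PySem.List.pyGetD_natCast]; simp [List.getD_eq_getElem?_getD, hs]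
      rw [hget, hdrop]
      simp only [List.zip_cons_cons, List.foldl_cons]
      have : ((s : Int) + 1) = ((s + 1 : Nat) : Int) := by push_cast; ring
      rw [this, ih]
    · have hge : ¬ ((s : Int) < (ys.length : Int)) := by exact_mod_cast hs
      rw [if_neg hge]
      have hdrop : ys.drop s = [] := List.drop_eq_nil_of_le (by omega)
      have hdrop' : ys.drop (s + 1) = [] := List.drop_eq_nil_of_le (by omega)
      have : ((s : Int) + 1) = ((s + 1 : Nat) : Int) := by push_cast; ring
      rw [hdrop, this, ih, hdrop']
      simp

-- B's initial group dict {e: [] for e in allowed} answers some [] at every allowed element.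
theorem init_get?_allowed (e : String) (he : e ∈ pvAllowedB) :
    (pvAllowedB.foldl (fun d e => d.insert e ([] : List Int)) PySem.Dict.empty).get? e
      = some [] := by
  fin_cases he <;> decide

-- B's grouped-and-looked-up list at an allowed element IS A's filter-comprehension for it.
theorem group_getD {α : Type} (f : α → String) (v : α → Int) (l : List α) (e : String)
    (he : e ∈ pvAllowedB) :
    (l.foldl (fun d x =>
        if d.contains (f x) then d.modify (f x) [] (fun g => g ++ [v x]) else d)
      (pvAllowedB.foldl (fun d e => d.insert e ([] : List Int)) PySem.Dict.empty)).getD e []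
      = (l.filter (fun x => f x == e)).map v := by
  simp [PySem.Dict.getD, groupFold_get?, init_get?_allowed e he]

-- ===== VERDICT (by name: the statement is the Claim_ definition above) =====
theorem try_heuristic_mapping_py_spec : Claim_equal_try_heuristic_mapping_py := by
  intro peak_atoms struct_atoms _hdom _hpre
  unfold Spec_try_heuristic_mapping_py try_heuristic_mapping_py try_heuristic_mapping_py_alt
  have hElems : pvElemsA = pvAllowedB := rfl
  rw [hElems]
  have hmap :
      pvAllowedB.foldl (fun mapping element =>
        (PySem.List.enumerate
            (PySem.List.sorted
              ((peak_atoms.filter (fun kv => pvElement kv.2 == element)).map Prod.fst)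
              (fun x => x) false)).foldl (fun mapping ip =>
          if ip.1 < ((((PySem.List.enumerate struct_atoms).filter
                (fun ia => pvElement ia.2 == element)).map Prod.fst).length : Int) then
            mapping.insert ip.2
              (PySem.List.pyGetD
                (((PySem.List.enumerate struct_atoms).filter
                  (fun ia => pvElement ia.2 == element)).map Prod.fst) ip.1 0)
          else mapping) mapping) PySem.Dict.empty
      = pvAllowedB.foldl (fun mapping e =>
          ((PySem.List.sorted
              ((peak_atoms.foldl (fun d kv =>
                  if d.contains (pvElement kv.2) then
                    d.modify (pvElement kv.2) [] (fun g => g ++ [kv.1])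
                  else d)
                (pvAllowedB.foldl (fun d e => d.insert e ([] : List Int)) PySem.Dict.empty)).getD e [])
              (fun x => x) false).zip
            (((PySem.List.enumerate struct_atoms).foldl (fun d ia =>
                  if d.contains (pvElement ia.2) then
                    d.modify (pvElement ia.2) [] (fun g => g ++ [ia.1])
                  else d)
                (pvAllowedB.foldl (fun d e => d.insert e ([] : List Int)) PySem.Dict.empty)).getD e [])).foldl
            (fun mapping p => mapping.insert p.1 p.2) mapping) PySem.Dict.empty := by
    apply PySem.List.foldl_congr_mem
    intro m e he
    rw [group_getD (fun kv => pvElement kv.2) Prod.fst peak_atoms e he,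
        group_getD (fun ia => pvElement ia.2) Prod.fst (PySem.List.enumerate struct_atoms) e he]
    have := enumFold_zip
      (PySem.List.sorted
        ((peak_atoms.filter (fun kv => pvElement kv.2 == e)).map Prod.fst) (fun x => x) false)
      (((PySem.List.enumerate struct_atoms).filter
        (fun ia => pvElement ia.2 == e)).map Prod.fst) 0 m
    simpa using this
  simp only [hmap]
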